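-- pv_equiv track=rewrite | github.com/junyeong-nero/PS | leetcode/hash-table/1726.py | tupleSameProduct
-- ===== SOURCE A (Python) =====
-- from typing import List
--
-- from collections import Counter
--
-- def tupleSameProduct(nums: List[int]) -> int:
--     """
--     Finds the number of tuples (a, b, c, d) such that a * b = c * d,
--     where a, b, c, and d are distinct elements from nums.
--
--     Args:
--         nums: A list of integers.
--
--     Returns:
--         The number of tuples with the same product.
--     """
--     product_counts = Counter()
--     n = len(nums)
--
--     for i in range(n):
--         for j in range(i + 1, n):
--             product = nums[i] * nums[j]
--             product_counts[product] += 1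
--
--     total_tuples = 0
--     for count in product_counts.values():
--         if count >= 2:  # Need at least 2 pairs to form tuples
--             # Number of ways to choose 2 pairs from 'count' pairs
--             num_pair_combinations = count * (count - 1) // 2
--             total_tuples += (
--                 num_pair_combinations * 8
--             )  # Each pair combination gives 8 tuples
--
--     return total_tuples
-- ===== SOURCE B (Python) =====
-- from typing import List
--
-- def tupleSameProduct(nums: List[int]) -> int:
--     # Sort-then-scan: sort all pair products, then walk maximal runs of equal
--     # values; a run of length c contributes c*(c-1)//2 * 8 tuples. No hash map.
--     n = len(nums)
--     products = sorted(nums[i] * nums[j] for i in range(n) for j in range(i + 1, n))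
--     total = 0
--     i = 0
--     m = len(products)
--     while i < m:
--         j = i + 1
--         while j < m and products[j] == products[i]:
--             j += 1
--         c = j - i
--         total += c * (c - 1) // 2 * 8
--         i = j
--     return total
-- ===== Notes on version B (the rewrite author's own statement) =====
-- stated objective: alternative
-- what changed: Replaces A's hash-map Counter and second summation pass with a sort-based algorithm: all pair products are sorted, then one scan over maximal runs of equal values adds c*(c-1)//2*8 per run of length c.
import Mathlib
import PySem

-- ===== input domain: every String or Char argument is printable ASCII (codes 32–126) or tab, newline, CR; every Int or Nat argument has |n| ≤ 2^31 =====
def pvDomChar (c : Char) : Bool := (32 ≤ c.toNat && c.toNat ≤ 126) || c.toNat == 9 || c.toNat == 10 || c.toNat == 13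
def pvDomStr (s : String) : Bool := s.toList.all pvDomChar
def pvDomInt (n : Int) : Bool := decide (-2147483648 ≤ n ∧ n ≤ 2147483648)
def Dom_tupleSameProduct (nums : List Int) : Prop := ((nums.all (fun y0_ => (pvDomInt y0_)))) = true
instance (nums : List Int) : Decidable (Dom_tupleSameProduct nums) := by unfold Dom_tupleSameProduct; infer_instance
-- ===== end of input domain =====

-- B replaces A's hash-map Counter + C(count,2) summation pass with a different
-- algorithm: sort all pair products, then scan maximal runs of equal values,
-- adding c*(c-1)//2*8 per run (objective: alternative, same answer, no hash map).

-- ===== PORT A =====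
def tupleSameProduct (nums : List Int) : Int :=
  let n : Int := nums.length
  let product_counts : PySem.Dict Int Int :=
    (PySem.List.pyRange 0 n 1).foldl (fun d i =>
      (PySem.List.pyRange (i + 1) n 1).foldl (fun d j =>
        d.modify (PySem.List.pyGetD nums i 0 * PySem.List.pyGetD nums j 0) 0 (· + 1)) d)
      PySem.Dict.empty
  product_counts.values.foldl (fun total count =>
    if 2 ≤ count then total + PySem.Int.floordiv (count * (count - 1)) 2 * 8 else total) 0

-- ===== PORT B =====
-- B's outer while loop: consume one maximal run of equal leading values per step
-- (the inner `while products[j] == products[i]` scan is the takeWhile/dropWhile split).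
def pvRunLoop (products : List Int) (total : Int) : Int :=
  match products with
  | [] => total
  | p :: rest =>
      let c : Int := 1 + (rest.takeWhile (fun y => y == p)).length
      pvRunLoop (rest.dropWhile (fun y => y == p)) (total + PySem.Int.floordiv (c * (c - 1)) 2 * 8)
termination_by products.length
decreasing_by
  simp only [List.length_cons]
  exact Nat.lt_succ_of_le (List.length_dropWhile_le _ _)

def tupleSameProduct_alt (nums : List Int) : Int :=
  let n : Int := nums.length
  let products : List Int :=
    PySem.List.sorted
      ((PySem.List.pyRange 0 n 1).flatMap (fun i =>
        (PySem.List.pyRange (i + 1) n 1).map (fun j =>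
          PySem.List.pyGetD nums i 0 * PySem.List.pyGetD nums j 0)))
      (fun x => x) false
  pvRunLoop products 0

-- ===== PRECONDITION & SPEC =====
def Spec_tupleSameProduct (nums : List Int) (out : Int) : Prop := out = tupleSameProduct_alt nums
instance (nums : List Int) (out : Int) : Decidable (Spec_tupleSameProduct nums out) := by unfold Spec_tupleSameProduct; infer_instance

-- ===== CLAIM (what is proved, stated in full; the proofs are below) =====
def Claim_equal_tupleSameProduct : Prop := ∀ (nums : List Int), Dom_tupleSameProduct nums → Spec_tupleSameProduct nums (tupleSameProduct nums)

-- ===== LEMMAS AND PROOFS =====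

-- A's summand for a product occurring `c` times
def pvG (c : Int) : Int := if 2 ≤ c then PySem.Int.floordiv (c * (c - 1)) 2 * 8 else 0

-- B's summand (no `count >= 2` guard; equal to pvG for c ≥ 1)
def pvH (c : Int) : Int := PySem.Int.floordiv (c * (c - 1)) 2 * 8

theorem pvG_eq_pvH (c : Int) (hc : 1 ≤ c) : pvG c = pvH c := by
  unfold pvG pvH
  by_cases h : 2 ≤ c
  · rw [if_pos h]
  · have : c = 1 := by omega
    subst this
    rw [if_neg h]
    decide

theorem pvFoldG (vs : List Int) (a : Int) :
    vs.foldl (fun total count =>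
      if 2 ≤ count then total + PySem.Int.floordiv (count * (count - 1)) 2 * 8 else total) a
    = a + (vs.map pvG).sum := by
  induction vs generalizing a with
  | nil => simp
  | cons v vs ih =>
    simp only [List.foldl_cons, List.map_cons, List.sum_cons, ih]
    unfold pvG
    split_ifs <;> omega

-- p does not occur in the dropped suffix, on a ≤-sorted list
theorem pvNotMem_drop (p : Int) (rest : List Int)
    (hs : (p :: rest).Pairwise (· ≤ ·)) :
    p ∉ rest.dropWhile (fun y => y == p) := by
  intro hmem
  cases hr : rest.dropWhile (fun y => y == p) with
  | nil => rw [hr] at hmem; exact (List.not_mem_nil) hmem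
  | cons q tq =>
    have hqp : (fun y => y == p) q = false := by
      have h1 : rest.dropWhile (fun y => y == p) ≠ [] := by simp [hr]
      have h2 := List.head_dropWhile_not (fun y => y == p) h1
      have h3 : (rest.dropWhile (fun y => y == p)).head h1 = q := by simp [hr]
      rw [h3] at h2
      simpa using h2
    have hq_ne : q ≠ p := by simpa using hqp
    have hrs : (rest.dropWhile (fun y => y == p)).Sublist rest := List.dropWhile_sublist _
    have hcons := List.pairwise_cons.mp hs
    have hple : p ≤ q := hcons.1 q (hrs.subset (by rw [hr]; exact List.mem_cons_self))
    have hpair' : (q :: tq).Pairwise (· ≤ ·) := hr ▸ (hcons.2.sublist hrs)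
    rw [hr] at hmem
    rcases List.mem_cons.mp hmem with heq | hmem'
    · exact hq_ne heq.symm
    · have hqle : q ≤ p := (List.pairwise_cons.mp hpair').1 p hmem'
      have : p < q := lt_of_le_of_ne hple (Ne.symm hq_ne)
      omega

-- one run step of the per-distinct-value sum
theorem pvSum_step (p : Int) (rest same rest' : List Int)
    (hsplit : same ++ rest' = rest)
    (hsame_all : ∀ x ∈ same, x = p)
    (hp : p ∉ rest') :
    ((PySem.List.dedup (p :: rest)).map (fun k => pvH (((p :: rest).count k : Int)))).sum
      = pvH (1 + (same.length : Int))
        + ((PySem.List.dedup rest').map (fun k => pvH ((rest'.count k : Int)))).sum := by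
  have hcountp : (p :: rest).count p = 1 + same.length := by
    rw [← hsplit, List.count_cons_self, List.count_append]
    have h1 : same.count p = same.length := by
      rw [List.count_eq_length]
      intro b hb
      exact (hsame_all b hb).symm
    have h2 : rest'.count p = 0 := List.count_eq_zero.mpr hp
    omega
  have hck : ∀ k ∈ PySem.List.dedup rest', (p :: rest).count k = rest'.count k := by
    intro k hk
    have hkr : k ∈ rest' := (PySem.List.mem_dedup _ _).mp hk
    have hkp : k ≠ p := fun h => hp (h ▸ hkr)
    rw [← hsplit, List.count_cons_of_ne hkp.symm, List.count_append]
    have h0 : same.count k = 0 :=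
      List.count_eq_zero.mpr (fun hks => hkp (hsame_all k hks))
    omega
  have hnd2 : (p :: PySem.List.dedup rest').Nodup :=
    List.nodup_cons.mpr
      ⟨fun h => hp ((PySem.List.mem_dedup _ _).mp h), PySem.List.nodup_dedup _⟩
  have hperm : (PySem.List.dedup (p :: rest)).Perm (p :: PySem.List.dedup rest') := by
    refine (List.perm_ext_iff_of_nodup (PySem.List.nodup_dedup _) hnd2).mpr ?_
    intro a
    rw [PySem.List.mem_dedup]
    constructor
    · intro ha
      rcases List.mem_cons.mp ha with rfl | har
      · exact List.mem_cons_self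
      · rw [← hsplit] at har
        rcases List.mem_append.mp har with h | h
        · rw [hsame_all a h]; exact List.mem_cons_self
        · exact List.mem_cons_of_mem _ ((PySem.List.mem_dedup _ _).mpr h)
    · intro ha
      rcases List.mem_cons.mp ha with rfl | har
      · exact List.mem_cons_self
      · refine List.mem_cons_of_mem _ ?_
        rw [← hsplit]
        exact List.mem_append.mpr (Or.inr ((PySem.List.mem_dedup _ _).mp har))
  rw [List.Perm.sum_eq (hperm.map (fun k => pvH (((p :: rest).count k : Int))))]
  rw [List.map_cons, List.sum_cons, hcountp]
  have hc : (((1 + same.length : Nat) : Int)) = 1 + (same.length : Int) := by push_cast; ring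
  rw [hc]
  congr 1
  exact congrArg List.sum (List.map_congr_left (fun k hk => by rw [hck k hk]))

-- run-scan over a ≤-sorted list computes the per-distinct-value sum of pvH
theorem pvRunLoop_sorted_aux : ∀ (n : Nat) (s : List Int), s.length ≤ n →
    ∀ (t : Int), s.Pairwise (· ≤ ·) →
    pvRunLoop s t = t + ((PySem.List.dedup s).map (fun k => pvH ((s.count k : Int)))).sum := by
  intro n
  induction n with
  | zero =>
    intro s hlen t _
    have : s = [] := List.eq_nil_of_length_eq_zero (Nat.le_zero.mp hlen)
    subst this
    simp [pvRunLoop, PySem.List.dedup]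
  | succ n ih =>
    intro s hlen t hs
    match s with
    | [] => simp [pvRunLoop, PySem.List.dedup]
    | p :: rest =>
      have hstep : pvRunLoop (p :: rest) t
          = pvRunLoop (rest.dropWhile (fun y => y == p))
              (t + pvH (1 + ((rest.takeWhile (fun y => y == p)).length : Int))) := by
        rw [pvRunLoop]
        simp only [pvH]
      have hp : p ∉ rest.dropWhile (fun y => y == p) := pvNotMem_drop p rest hs
      have hpair' : (rest.dropWhile (fun y => y == p)).Pairwise (· ≤ ·) :=
        (List.pairwise_cons.mp hs).2.sublist (List.dropWhile_sublist _)
      have hlen' : (rest.dropWhile (fun y => y == p)).length ≤ n := by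
        have := List.length_dropWhile_le (fun y => y == p) rest
        simp only [List.length_cons] at hlen
        omega
      rw [hstep, ih _ hlen' _ hpair']
      rw [pvSum_step p rest (rest.takeWhile (fun y => y == p)) (rest.dropWhile (fun y => y == p))
            List.takeWhile_append_dropWhile
            (fun x hx => by simpa using List.mem_takeWhile_imp hx) hp]
      ring

theorem pvRunLoop_sorted (s : List Int) (t : Int) (hs : s.Pairwise (· ≤ ·)) :
    pvRunLoop s t = t + ((PySem.List.dedup s).map (fun k => pvH ((s.count k : Int)))).sum :=
  pvRunLoop_sorted_aux s.length s le_rfl t hs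

-- ===== VERDICT (by name: the statement is the Claim_ definition above) =====
theorem tupleSameProduct_spec : Claim_equal_tupleSameProduct := by
  intro nums _
  unfold Spec_tupleSameProduct tupleSameProduct tupleSameProduct_alt
  dsimp only
  set P : List Int :=
    (PySem.List.pyRange 0 (nums.length : Int) 1).flatMap (fun i =>
      (PySem.List.pyRange (i + 1) (nums.length : Int) 1).map (fun j =>
        PySem.List.pyGetD nums i 0 * PySem.List.pyGetD nums j 0)) with hP
  have hdict :
      (PySem.List.pyRange 0 (nums.length : Int) 1).foldl (fun d i =>
        (PySem.List.pyRange (i + 1) (nums.length : Int) 1).foldl (fun d j =>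
          d.modify (PySem.List.pyGetD nums i 0 * PySem.List.pyGetD nums j 0) 0 (· + 1)) d)
        PySem.Dict.empty = PySem.Dict.counter P := by
    rw [PySem.Dict.counter_eq_foldl, hP, List.foldl_flatMap]
    simp only [List.foldl_map]
  rw [hdict]
  have hvals : (PySem.Dict.counter P).values
      = (PySem.List.dedup P).map (fun k => (P.count k : Int)) := by
    simp [PySem.Dict.values, PySem.Dict.items_counter]
  rw [hvals, pvFoldG, List.map_map]
  set s : List Int := PySem.List.sorted P (fun x => x) false with hsdef
  have hsp : s.Pairwise (· ≤ ·) := by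
    have := PySem.List.sorted_pairwise P (fun x => x) (κ := Int)
    simpa [hsdef] using this
  rw [pvRunLoop_sorted s 0 hsp]
  have hcount : ∀ k, s.count k = P.count k :=
    fun k => (PySem.List.sorted_perm P (fun x => x) false).count_eq k
  have hpermD : (PySem.List.dedup P).Perm (PySem.List.dedup s) := by
    refine (List.perm_ext_iff_of_nodup (PySem.List.nodup_dedup _) (PySem.List.nodup_dedup _)).mpr ?_
    intro a
    rw [PySem.List.mem_dedup, PySem.List.mem_dedup]
    exact ((PySem.List.sorted_perm P (fun x => x) false).mem_iff).symm
  have hA : (PySem.List.dedup P).map ((fun k => pvG k) ∘ (fun k => (P.count k : Int)))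
      = (PySem.List.dedup P).map (fun k => pvH ((P.count k : Int))) := by
    apply List.map_congr_left
    intro k hk
    have hpos : 0 < P.count k := by
      rw [List.count_pos_iff]
      exact (PySem.List.mem_dedup _ _).mp hk
    show pvG ((P.count k : Int)) = pvH ((P.count k : Int))
    exact pvG_eq_pvH _ (by exact_mod_cast hpos)
  rw [hA]
  have hB : (PySem.List.dedup s).map (fun k => pvH ((s.count k : Int)))
      = (PySem.List.dedup s).map (fun k => pvH ((P.count k : Int))) :=
    List.map_congr_left (fun k _ => by rw [hcount k])
  rw [hB]
  rw [List.Perm.sum_eq (hpermD.map (fun k => pvH ((P.count k : Int))))]
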